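-- pv_equiv track=rewrite | github.com/TejasViswa/sepmi | examples/05_select_topk.py | build_k_schedule
-- ===== SOURCE A (Python) =====
-- def build_k_schedule(n: int, K_final: int):
--     """
--     Build a descending K schedule, warm-starting each stage:
--       Prefer [500, 400, 300, 200, 100] filtered to [>= K_final, <= n],
--       and ensure the last stage equals K_final (even if not in the base list).
--     """
--     base = [100]
--     sched = [k for k in base if (k <= n and k >= K_final)]
--     if len(sched) == 0:
--         sched = [min(n, K_final)]
--     if sched[-1] != K_final:
--         if K_final <= n:
--             sched.append(K_final)
--         else:
--             sched.append(n)
--     # ensure strictly descending & unique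
--     out = []
--     for k in sched:
--         if len(out) == 0 or k < out[-1]:
--             out.append(k)
--     return out
-- ===== SOURCE B (Python) =====
-- def build_k_schedule(n: int, K_final: int):
--     # Closed-form: the only multi-stage schedule is [100, K_final]
--     # (when 100 fits between K_final and n); otherwise a single stage.
--     if K_final < 100 <= n:
--         return [100, K_final]
--     return [min(n, K_final)]
-- ===== Notes on version B (the rewrite author's own statement) =====
-- stated objective: simpler
-- what changed: Replaced the filter/append/dedup pipeline with a direct two-case closed form: [100, K_final] when K_final < 100 <= n, else [min(n, K_final)].
import Mathlib
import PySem

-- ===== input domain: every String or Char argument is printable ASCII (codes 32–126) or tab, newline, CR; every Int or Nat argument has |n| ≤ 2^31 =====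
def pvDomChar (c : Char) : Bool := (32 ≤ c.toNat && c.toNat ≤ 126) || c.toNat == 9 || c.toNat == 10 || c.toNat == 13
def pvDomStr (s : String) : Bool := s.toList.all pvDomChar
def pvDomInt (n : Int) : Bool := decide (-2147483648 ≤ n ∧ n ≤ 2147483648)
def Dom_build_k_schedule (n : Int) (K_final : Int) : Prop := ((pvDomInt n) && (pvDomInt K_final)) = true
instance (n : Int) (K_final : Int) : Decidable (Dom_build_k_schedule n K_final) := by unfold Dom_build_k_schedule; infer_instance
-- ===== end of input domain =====

-- B replaces A's build/filter/append/dedup pipeline with a two-case closed form (objective: simpler).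

-- ===== PORT A =====
def build_k_schedule (n : Int) (K_final : Int) : List Int :=
  let base : List Int := [100]
  -- [k for k in base if (k <= n and k >= K_final)]
  let sched := base.foldl (fun acc k => if k ≤ n ∧ K_final ≤ k then acc ++ [k] else acc) []
  -- if len(sched) == 0: sched = [min(n, K_final)]
  let sched2 := if sched.length = 0 then [min n K_final] else sched
  -- if sched[-1] != K_final: append K_final or n  (sched2 is always nonempty, so getD is exact)
  let sched3 := if sched2.getLast?.getD 0 ≠ K_final then
      (if K_final ≤ n then sched2 ++ [K_final] else sched2 ++ [n])
    else sched2
  -- dedup pass keeping strictly descending values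
  sched3.foldl (fun out k =>
      if out.length = 0 ∨ k < out.getLast?.getD 0 then out ++ [k] else out) []

-- ===== PORT B =====
def build_k_schedule_alt (n : Int) (K_final : Int) : List Int :=
  if K_final < 100 ∧ 100 ≤ n then [100, K_final] else [min n K_final]

-- ===== PRECONDITION & SPEC =====
def Spec_build_k_schedule (n : Int) (K_final : Int) (out : List Int) : Prop := out = build_k_schedule_alt n K_final
instance (n : Int) (K_final : Int) (out : List Int) : Decidable (Spec_build_k_schedule n K_final out) := by unfold Spec_build_k_schedule; infer_instance

-- ===== CLAIM (what is proved, stated in full; the proofs are below) =====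
def Claim_equal_build_k_schedule : Prop := ∀ (n : Int) (K_final : Int), Dom_build_k_schedule n K_final → Spec_build_k_schedule n K_final (build_k_schedule n K_final)

-- ===== LEMMAS AND PROOFS =====

-- ===== VERDICT (by name: the statement is the Claim_ definition above) =====
theorem build_k_schedule_spec : Claim_equal_build_k_schedule := by
  intro n K_final _
  unfold Spec_build_k_schedule build_k_schedule build_k_schedule_alt
  by_cases h1 : (100 : Int) ≤ n <;> by_cases h2 : K_final ≤ (100 : Int) <;>
    by_cases h3 : K_final = (100 : Int) <;> by_cases h4 : K_final ≤ n <;>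
    simp [List.foldl, h1, h2, h3, h4, min_def] <;>
    first
      | omega
      | (split_ifs <;> simp_all [List.foldl] <;> omega)
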